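-- pv_equiv track=rewrite | github.com/hamdav/kandidatarbete-kod | Polynomial.py | sortWithParity
-- ===== SOURCE A (Python) =====
-- def sortWithParity(gms):
--     """
--     Sorts the iterable gms and keeps track of the parity
--     Returns sorted tuple and True if parity of sort is even, False if odd.
--
--     For now, it uses insertion sort
--     """
--
--     parity = True
--
--     l = list(gms)
--     sortedIndex = 0     # The list is sorted before this index.
--
--     # When sortedIndex becomes the length of the list, the entire list is sorted.
--     while sortedIndex < len(l):
--
--         element = l[sortedIndex]
--         i = sortedIndex
--         sortedIndex += 1
--
--         while(i>0 and l[i-1]>element):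
--             l[i]=l[i-1]
--             i=i-1
--             parity = not parity
--
--         l[i]=element
--
--     return tuple(l), parity
-- ===== SOURCE B (Python) =====
-- def sortWithParity(gms):
--     """
--     Sorts the iterable gms and keeps track of the parity.
--     Returns sorted tuple and True if parity of sort is even, False if odd.
--
--     Merge sort counting inversions; parity = (#inversions even).
--     """
--
--     def msort(a):
--         if len(a) <= 1:
--             return a, 0
--         mid = len(a) // 2
--         left, invl = msort(a[:mid])
--         right, invr = msort(a[mid:])
--         merged = []
--         inv = invl + invr
--         i = 0
--         j = 0
--         while i < len(left) and j < len(right):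
--             if right[j] < left[i]:
--                 merged.append(right[j])
--                 j += 1
--                 inv += len(left) - i
--             else:
--                 merged.append(left[i])
--                 i += 1
--         merged.extend(left[i:])
--         merged.extend(right[j:])
--         return merged, inv
--
--     s, inv = msort(list(gms))
--     return tuple(s), inv % 2 == 0
-- ===== Notes on version B (the rewrite author's own statement) =====
-- stated objective: faster
-- what changed: Replaced the quadratic insertion sort with shift-count parity by a merge sort that counts inversions and returns the parity of the total inversion count.
import Mathlib
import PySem

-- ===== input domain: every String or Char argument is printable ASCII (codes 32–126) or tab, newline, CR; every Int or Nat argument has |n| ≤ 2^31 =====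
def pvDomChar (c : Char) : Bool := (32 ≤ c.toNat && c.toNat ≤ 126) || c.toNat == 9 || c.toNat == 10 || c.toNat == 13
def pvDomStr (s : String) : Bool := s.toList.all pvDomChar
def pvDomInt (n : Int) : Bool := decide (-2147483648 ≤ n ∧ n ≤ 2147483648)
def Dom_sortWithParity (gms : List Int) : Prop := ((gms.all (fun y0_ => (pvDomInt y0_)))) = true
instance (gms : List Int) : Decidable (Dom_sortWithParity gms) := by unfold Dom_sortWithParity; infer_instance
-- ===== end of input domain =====

-- B replaces A's quadratic insertion sort (parity toggled per shift) by an O(n log n)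
-- merge sort counting inversions; parity = evenness of the inversion count.
-- (A mutates only its local copy `list(gms)`, so return-value equivalence is full equivalence.)

-- ===== PORT A =====
-- inner while loop: `while i>0 and l[i-1]>element: l[i]=l[i-1]; i=i-1; parity = not parity`
-- (indices i, i-1 are always in range, so `getD _ 0` is exact for Python's l[i-1])
def pvInnerA (l : List Int) (element : Int) (i : Nat) (parity : Bool) : List Int × Nat × Bool :=
  if h : 0 < i ∧ element < l.getD (i - 1) 0 then
    pvInnerA (l.set i (l.getD (i - 1) 0)) element (i - 1) (!parity)
  else (l, i, parity)
termination_by i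
decreasing_by omega

-- needed by pvOuterA's termination: the inner loop never changes the list's length
theorem pvInnerA_length (l : List Int) (e : Int) (i : Nat) (p : Bool) :
    (pvInnerA l e i p).1.length = l.length := by
  induction l, i, p using pvInnerA.induct e with
  | case1 l i p h ih => rw [pvInnerA, dif_pos h]; simpa using ih
  | case2 l i p h => rw [pvInnerA, dif_neg h]

-- outer while loop over sortedIndex; `l[sortedIndex]` is in range, `getD _ 0` exact
def pvOuterA (l : List Int) (sortedIndex : Nat) (parity : Bool) : List Int × Bool :=
  if h : sortedIndex < l.length then
    let element := l.getD sortedIndex 0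
    let r := pvInnerA l element sortedIndex parity
    pvOuterA (r.1.set r.2.1 element) (sortedIndex + 1) r.2.2
  else (l, parity)
termination_by l.length - sortedIndex
decreasing_by simp only [List.length_set, pvInnerA_length]; omega

def sortWithParity (gms : List Int) : List Int × Bool :=
  pvOuterA gms 0 true

-- ===== PORT B =====
-- the merge `while i < len(left) and j < len(right)` loop, tail-recursive over the two
-- remaining suffixes; `merged` is the accumulator, `inv + (x::xs).length` is `inv += len(left)-i`;
-- the fall-through arm is `merged.extend(left[i:]); merged.extend(right[j:])`
def pvMergeB (left right merged : List Int) (inv : Nat) : List Int × Nat :=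
  match left, right with
  | x :: xs, y :: ys =>
    if y < x then pvMergeB (x :: xs) ys (merged ++ [y]) (inv + (x :: xs).length)
    else pvMergeB xs (y :: ys) (merged ++ [x]) inv
  | l, r => (merged ++ l ++ r, inv)
termination_by left.length + right.length

-- `msort`: split at mid = len(a)//2 (slices a[:mid], a[mid:]), recurse, merge
def pvMsortB (a : List Int) : List Int × Nat :=
  if _h : a.length ≤ 1 then (a, 0)
  else
    let mid := a.length / 2
    let L := pvMsortB (PySem.List.slice a none (some (mid : Int)))
    let R := pvMsortB (PySem.List.slice a (some (mid : Int)) none)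
    pvMergeB L.1 R.1 [] (L.2 + R.2)
termination_by a.length
decreasing_by
  · simp only [PySem.List.slice_to_natCast, List.length_take]; omega
  · simp only [PySem.List.slice_from_natCast, List.length_drop]; omega

def sortWithParity_alt (gms : List Int) : List Int × Bool :=
  let r := pvMsortB gms
  (r.1, decide (r.2 % 2 = 0))

-- ===== PRECONDITION & SPEC =====
def Spec_sortWithParity (gms : List Int) (out : List Int × Bool) : Prop := out = sortWithParity_alt gms
instance (gms : List Int) (out : List Int × Bool) : Decidable (Spec_sortWithParity gms out) := by unfold Spec_sortWithParity; infer_instance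

-- ===== CLAIM (what is proved, stated in full; the proofs are below) =====
def Claim_equal_sortWithParity : Prop := ∀ (gms : List Int), Dom_sortWithParity gms → Spec_sortWithParity gms (sortWithParity gms)

-- ===== LEMMAS AND PROOFS =====

-- number of inversions of a list (pairs i < j with l[i] > l[j]), grouped by the later index
def invC : List Int → Nat
  | [] => 0
  | x :: xs => xs.countP (fun y => decide (y < x)) + invC xs

-- cross inversions between a block `a` and a later block `b`
def crossC (a b : List Int) : Nat :=
  (b.map (fun y => a.countP (fun x => decide (y < x)))).sum

-- pure (accumulator-free) mirror of pvMergeB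
def mrgP : List Int → List Int → List Int × Nat
  | x :: xs, y :: ys =>
    if y < x then
      let r := mrgP (x :: xs) ys
      (y :: r.1, r.2 + (x :: xs).length)
    else
      let r := mrgP xs (y :: ys)
      (x :: r.1, r.2)
  | l, r => (l ++ r, 0)
termination_by l r => l.length + r.length

theorem pvMergeB_eq (left right : List Int) :
    ∀ (acc : List Int) (inv : Nat),
      pvMergeB left right acc inv = (acc ++ (mrgP left right).1, inv + (mrgP left right).2) := by
  induction left, right using mrgP.induct with
  | case1 x xs y ys h ih =>
    intro acc inv
    rw [pvMergeB, if_pos h, ih, mrgP, if_pos h]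
    simp [List.append_assoc]; omega
  | case2 x xs y ys h ih =>
    intro acc inv
    rw [pvMergeB, if_neg h, ih, mrgP, if_neg h]
    simp [List.append_assoc]
  | case3 l r h =>
    intro acc inv
    rcases l with _ | ⟨x, xs⟩
    · rw [pvMergeB.eq_def, mrgP.eq_def]; simp
    · rcases r with _ | ⟨y, ys⟩
      · rw [pvMergeB.eq_def, mrgP.eq_def]; simp
      · exact (h x xs y ys rfl rfl).elim

theorem crossC_cons_left (x : Int) (a b : List Int) :
    crossC (x :: a) b = b.countP (fun y => decide (y < x)) + crossC a b := by
  induction b with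
  | nil => rfl
  | cons y ys ih => simp [crossC, List.countP_cons] at ih ⊢; omega


theorem crossC_perm_left {a a' : List Int} (h : a.Perm a') (b : List Int) :
    crossC a b = crossC a' b := by
  unfold crossC
  congr 1
  exact List.map_congr_left (fun y _ => h.countP_eq _)

theorem crossC_perm_right (a : List Int) {b b' : List Int} (h : b.Perm b') :
    crossC a b = crossC a b' := by
  exact List.Perm.sum_eq (h.map _)

theorem invC_append (a b : List Int) : invC (a ++ b) = invC a + invC b + crossC a b := by
  induction a with
  | nil => simp [invC, crossC]
  | cons x xs ih => simp [invC, List.countP_append, crossC_cons_left, ih]; omega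

theorem invC_sorted {s : List Int} (h : List.Pairwise (· ≤ ·) s) : invC s = 0 := by
  induction s with
  | nil => rfl
  | cons x xs ih =>
    rw [List.pairwise_cons] at h
    simp [invC, ih h.2, List.countP_eq_zero]
    exact fun y hy => h.1 y hy

theorem mrgP_spec : ∀ (l r : List Int), List.Pairwise (· ≤ ·) l → List.Pairwise (· ≤ ·) r →
    (mrgP l r).1.Perm (l ++ r) ∧ List.Pairwise (· ≤ ·) (mrgP l r).1 ∧ (mrgP l r).2 = crossC l r := by
  intro l r
  induction l, r using mrgP.induct with
  | case1 x xs y ys h ih =>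
    intro hl hr
    rw [List.pairwise_cons] at hr
    obtain ⟨p1, p2, p3⟩ := ih hl hr.2
    rw [mrgP, if_pos h]
    have hperm : (y :: (mrgP (x :: xs) ys).1).Perm ((x :: xs) ++ y :: ys) :=
      (p1.cons y).trans List.perm_middle.symm
    have hxle : ∀ z ∈ x :: xs, y ≤ z := by
      intro z hz
      rcases List.mem_cons.mp hz with rfl | hz
      · exact le_of_lt h
      · exact le_of_lt (lt_of_lt_of_le h ((List.pairwise_cons.mp hl).1 z hz))
    refine ⟨hperm, ?_, ?_⟩
    · rw [List.pairwise_cons]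
      refine ⟨?_, p2⟩
      intro z hz
      rcases List.mem_append.mp ((p1.mem_iff).mp hz) with hz | hz
      · exact hxle z hz
      · exact hr.1 z hz
    · have hcnt : (x :: xs).countP (fun z => decide (y < z)) = (x :: xs).length :=
        List.countP_eq_length.mpr (fun z hz => decide_eq_true (by
          rcases List.mem_cons.mp hz with rfl | hz
          · exact h
          · exact lt_of_lt_of_le h ((List.pairwise_cons.mp hl).1 z hz)))
      simp only [crossC, List.map_cons, List.sum_cons]
      simp only [crossC] at p3
      rw [p3, hcnt]
      omega
  | case2 x xs y ys h ih =>
    intro hl hr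
    rw [List.pairwise_cons] at hl
    obtain ⟨p1, p2, p3⟩ := ih hl.2 hr
    rw [mrgP, if_neg h]
    have hyle : ∀ z ∈ y :: ys, x ≤ z := by
      intro z hz
      rcases List.mem_cons.mp hz with rfl | hz
      · exact not_lt.mp h
      · exact le_trans (not_lt.mp h) ((List.pairwise_cons.mp hr).1 z hz)
    refine ⟨?_, ?_, ?_⟩
    · exact p1.cons x
    · rw [List.pairwise_cons]
      refine ⟨?_, p2⟩
      intro z hz
      rcases List.mem_append.mp ((p1.mem_iff).mp hz) with hz | hz
      · exact hl.1 z hz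
      · exact hyle z hz
    · rw [crossC_cons_left]
      have : (y :: ys).countP (fun z => decide (z < x)) = 0 :=
        List.countP_eq_zero.mpr (fun z hz => by simpa using not_lt.mpr (hyle z hz))
      simp [p3, this]
  | case3 l r h =>
    intro hl hr
    rcases l with _ | ⟨x, xs⟩
    · rw [mrgP.eq_def]
      simpa [crossC] using hr
    · rcases r with _ | ⟨y, ys⟩
      · rw [mrgP.eq_def]
        simpa [crossC] using hl
      · exact (h x xs y ys rfl rfl).elim

theorem pvMsortB_spec (a : List Int) :
    (pvMsortB a).1.Perm a ∧ List.Pairwise (· ≤ ·) (pvMsortB a).1 ∧ (pvMsortB a).2 = invC a := by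
  induction a using pvMsortB.induct with
  | case1 a h =>
    rw [pvMsortB, dif_pos h]
    match a, h with
    | [], _ => exact ⟨List.Perm.refl _, List.Pairwise.nil, rfl⟩
    | [x], _ => exact ⟨List.Perm.refl _, by simp, rfl⟩
  | case2 a h mid ih1 ih2 =>
    rw [pvMsortB, dif_neg h]
    rw [PySem.List.slice_to_natCast] at ih1
    rw [PySem.List.slice_from_natCast] at ih2
    simp only [PySem.List.slice_to_natCast, PySem.List.slice_from_natCast]
    obtain ⟨q1, q2, q3⟩ := ih1
    obtain ⟨r1, r2, r3⟩ := ih2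
    obtain ⟨m1, m2, m3⟩ := mrgP_spec _ _ q2 r2
    rw [pvMergeB_eq]
    refine ⟨?_, ?_, ?_⟩
    · simpa using m1.trans ((q1.append r1).trans (by rw [List.take_append_drop]))
    · simpa using m2
    · have hca : invC a = invC (a.take (a.length / 2) ++ a.drop (a.length / 2)) := by
        rw [List.take_append_drop]
      rw [hca, invC_append, q3, r3, m3,
        crossC_perm_left q1, crossC_perm_right _ r1]

-- position of insertion: in a sorted list the elements > e form a suffix
theorem sorted_split (e : Int) : ∀ (s : List Int), List.Pairwise (· ≤ ·) s →
    (∀ x ∈ s.take (s.length - s.countP (fun x => decide (e < x))), x ≤ e) ∧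
    (∀ x ∈ s.drop (s.length - s.countP (fun x => decide (e < x))), e < x) := by
  intro s h
  induction s with
  | nil => simp
  | cons x xs ih =>
    rw [List.pairwise_cons] at h
    rcases le_or_gt x e with hx | hx
    · have hn : xs.countP (fun y => decide (e < y)) ≤ xs.length := List.countP_le_length
      have hc : (x :: xs).countP (fun y => decide (e < y)) = xs.countP (fun y => decide (e < y)) := by
        simp [not_lt.mpr hx]
      have hl : (x :: xs).length - (x :: xs).countP (fun y => decide (e < y))
          = (xs.length - xs.countP (fun y => decide (e < y))) + 1 := by
        simp [hc]; omega
      rw [hl]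
      obtain ⟨ih1, ih2⟩ := ih h.2
      refine ⟨?_, ?_⟩
      · intro z hz
        rw [List.take_succ_cons] at hz
        rcases List.mem_cons.mp hz with rfl | hz
        · exact hx
        · exact ih1 z hz
      · intro z hz
        rw [List.drop_succ_cons] at hz
        exact ih2 z hz
    · have hall : ∀ y ∈ xs, e < y := fun y hy => lt_of_lt_of_le hx (h.1 y hy)
      have hc : (x :: xs).countP (fun y => decide (e < y)) = (x :: xs).length := by
        apply List.countP_eq_length.mpr
        intro y hy
        rcases List.mem_cons.mp hy with rfl | hy
        · exact decide_eq_true hx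
        · exact decide_eq_true (hall y hy)
      rw [hc, Nat.sub_self]
      refine ⟨by simp, ?_⟩
      intro z hz
      rw [List.drop_zero] at hz
      rcases List.mem_cons.mp hz with rfl | hz
      · exact hx
      · exact hall z hz

-- setting the element right after a known prefix
theorem set_mid (a : List Int) (b e : Int) (c : List Int) :
    (a ++ b :: c).set a.length e = a ++ e :: c := by
  induction a with
  | nil => rfl
  | cons z a ih => simp [ih]

theorem getD_mid (a : List Int) (b : Int) (c : List Int) :
    (a ++ b :: c).getD a.length 0 = b := by
  induction a with
  | nil => rfl
  | cons z a ih => simpa using ih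

theorem parity_succ (n : Nat) : decide ((n + 1) % 2 = 1) = !decide (n % 2 = 1) := by
  rcases Nat.mod_two_eq_zero_or_one n with h | h <;> simp [Nat.add_mod, h]

theorem parity_add (a b : Nat) :
    decide ((a + b) % 2 = 1) = (decide (a % 2 = 1) ^^ decide (b % 2 = 1)) := by
  rcases Nat.mod_two_eq_zero_or_one a with h | h <;>
    rcases Nat.mod_two_eq_zero_or_one b with h2 | h2 <;> simp [Nat.add_mod, h, h2]

-- the inner loop inserts `e` (after the outer `l[i]=element`) into the sorted prefix
theorem pvInnerA_spec : ∀ (u : List Int), List.Pairwise (· ≤ ·) u → ∀ (d e : Int) (w : List Int) (p : Bool),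
    (pvInnerA (u ++ d :: w) e u.length p).1.set (pvInnerA (u ++ d :: w) e u.length p).2.1 e
        = u.take (u.length - u.countP (fun x => decide (e < x)))
          ++ e :: (u.drop (u.length - u.countP (fun x => decide (e < x))) ++ w) ∧
    (pvInnerA (u ++ d :: w) e u.length p).2.1 = u.length - u.countP (fun x => decide (e < x)) ∧
    (pvInnerA (u ++ d :: w) e u.length p).2.2
        = (p ^^ decide (u.countP (fun x => decide (e < x)) % 2 = 1)) := by
  intro u
  induction u using List.reverseRecOn with
  | nil =>
    intro _ d e w p
    rw [pvInnerA]
    simp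
  | append_singleton us a ih =>
    intro hs d e w p
    have hsp := List.pairwise_append.mp hs
    have hus : List.Pairwise (· ≤ ·) us := hsp.1
    have hua : ∀ x ∈ us, x ≤ a := fun x hx => hsp.2.2 x hx a (by simp)
    have hg : ((us ++ [a]) ++ d :: w).getD ((us ++ [a]).length - 1) 0 = a := by
      have h1 : (us ++ [a]) ++ d :: w = us ++ a :: (d :: w) := by simp
      have h2 : (us ++ [a]).length - 1 = us.length := by simp
      rw [h1, h2]
      exact getD_mid us a (d :: w)
    rcases lt_or_ge e a with he | he
    · -- a > element: one shift, recurse on us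
      have hstep : pvInnerA ((us ++ [a]) ++ d :: w) e (us ++ [a]).length p
          = pvInnerA (us ++ a :: (a :: w)) e us.length (!p) := by
        rw [pvInnerA, dif_pos ⟨by simp, by rw [hg]; exact he⟩]
        rw [hg]
        have h3 : ((us ++ [a]) ++ d :: w).set (us ++ [a]).length a = us ++ a :: (a :: w) := by
          have := set_mid (us ++ [a]) d a w
          simpa using this
        rw [h3]
        congr 1 <;> simp
      obtain ⟨ih1, ih2, ih3⟩ := ih hus a e (a :: w) (!p)
      have hcnt : (us ++ [a]).countP (fun x => decide (e < x))
          = us.countP (fun x => decide (e < x)) + 1 := by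
        simp [List.countP_append, he]
      have hn : us.countP (fun x => decide (e < x)) ≤ us.length := List.countP_le_length
      have hidx : (us ++ [a]).length - (us ++ [a]).countP (fun x => decide (e < x))
          = us.length - us.countP (fun x => decide (e < x)) := by
        simp [hcnt]
      rw [hstep, hidx]
      refine ⟨?_, ?_, ?_⟩
      · rw [ih1,
          List.take_append_of_le_length (by omega),
          List.drop_append_of_le_length (by omega)]
        simp
      · exact ih2
      · rw [ih3, hcnt, parity_succ]
        cases p <;> cases (decide (us.countP (fun x => decide (e < x)) % 2 = 1)) <;> rfl
    · -- a ≤ element: the loop stops; nothing is greater than e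
      have hz : (us ++ [a]).countP (fun x => decide (e < x)) = 0 := by
        apply List.countP_eq_zero.mpr
        intro x hx
        rcases List.mem_append.mp hx with hx | hx
        · simpa using not_lt.mpr (le_trans (hua x hx) he)
        · simp at hx
          subst hx
          simpa using not_lt.mpr he
      rw [pvInnerA, dif_neg (by
        rw [hg]
        rintro ⟨-, hlt⟩
        exact absurd hlt (not_lt.mpr he))]
      rw [hz]
      refine ⟨?_, by simp, by simp⟩
      have h4 : ((us ++ [a]) ++ d :: w).set ((us ++ [a]).length) e = (us ++ [a]) ++ e :: w :=
        set_mid (us ++ [a]) d e w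
      rw [Nat.sub_zero, h4, List.take_length, List.drop_length]
      simp

theorem pvOuterA_spec : ∀ (m : Nat) (l : List Int) (k : Nat) (p : Bool),
    l.length - k = m → k ≤ l.length → List.Pairwise (· ≤ ·) (l.take k) →
    ∃ r : List Int, pvOuterA l k p = (r, p ^^ decide (invC l % 2 = 1)) ∧
      r.Perm l ∧ List.Pairwise (· ≤ ·) r := by
  intro m
  induction m with
  | zero =>
    intro l k p hm hk hs
    have hkl : k = l.length := by omega
    subst hkl
    rw [pvOuterA, dif_neg (by omega)]
    rw [List.take_length] at hs
    refine ⟨l, ?_, List.Perm.refl l, hs⟩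
    rw [invC_sorted hs]
    simp
  | succ m ihm =>
    intro l k p hm hk hs
    have hkl : k < l.length := by omega
    rw [pvOuterA, dif_pos hkl]
    have hss : List.Pairwise (· ≤ ·) (l.take k) := hs
    have hsl : (l.take k).length = k := by simp; omega
    have hget : l.getD k 0 = l[k] := List.getD_eq_getElem l 0 hkl
    have hdecomp : l = l.take k ++ l[k] :: l.drop (k + 1) := by
      conv_lhs => rw [← List.take_append_drop k l]
      rw [List.drop_eq_getElem_cons hkl]
    obtain ⟨i1, i2, i3⟩ := pvInnerA_spec (l.take k) hss l[k] l[k] (l.drop (k + 1)) p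
    have hre : pvInnerA l l[k] k p
        = pvInnerA (l.take k ++ l[k] :: l.drop (k + 1)) l[k] (l.take k).length p := by
      rw [hsl, ← hdecomp]
    -- abbreviations
    have hn : (l.take k).countP (fun x => decide (l[k] < x)) ≤ k := by
      calc (l.take k).countP (fun x => decide (l[k] < x)) ≤ (l.take k).length :=
            List.countP_le_length
        _ = k := hsl
    obtain ⟨hA, hB⟩ := sorted_split l[k] (l.take k) hss
    -- the list after the insertion step
    have hins : List.Pairwise (· ≤ ·)
        ((l.take k).take ((l.take k).length - (l.take k).countP (fun x => decide (l[k] < x)))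
          ++ l[k] :: (l.take k).drop ((l.take k).length - (l.take k).countP (fun x => decide (l[k] < x)))) := by
      rw [List.pairwise_append]
      refine ⟨List.Pairwise.sublist (List.take_sublist _ _) hss, ?_, ?_⟩
      · rw [List.pairwise_cons]
        exact ⟨fun y hy => le_of_lt (hB y hy),
          List.Pairwise.sublist (List.drop_sublist _ _) hss⟩
      · intro x hx y hy
        rcases List.mem_cons.mp hy with rfl | hy
        · exact hA x hx
        · exact le_trans (hA x hx) (le_of_lt (hB y hy))
    have htad : (l.take k).take ((l.take k).length - (l.take k).countP (fun x => decide (l[k] < x)))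
          ++ (l.take k).drop ((l.take k).length - (l.take k).countP (fun x => decide (l[k] < x)))
        = l.take k := List.take_append_drop _ _
    -- abbreviate
    generalize hAn : (l.take k).take ((l.take k).length - (l.take k).countP (fun x => decide (l[k] < x))) = A at *
    generalize hBn : (l.take k).drop ((l.take k).length - (l.take k).countP (fun x => decide (l[k] < x))) = B at *
    generalize htn : l.drop (k + 1) = t at *
    generalize hcn : (l.take k).countP (fun x => decide (l[k] < x)) = n at *
    have hlenA : A.length + B.length = k := by
      have := congrArg List.length htad
      simp at this
      omega
    have hlenB : B.length = n := by
      rw [← hBn, ← hcn]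
      simp
      omega
    have hlent : t.length = l.length - (k + 1) := by rw [← htn]; simp
    -- the permuted list after insertion
    have hperm2 : (A ++ l[k] :: (B ++ t)).Perm l := by
      have h1 : (A ++ l[k] :: (B ++ t)).Perm (l[k] :: (A ++ (B ++ t))) := List.perm_middle
      have h2 : (l.take k ++ l[k] :: t).Perm (l[k] :: (l.take k ++ t)) := List.perm_middle
      rw [← List.append_assoc, htad] at h1
      refine h1.trans ?_
      conv_rhs => rw [hdecomp]
      exact h2.symm
    have hlen2 : (A ++ l[k] :: (B ++ t)).length = l.length := hperm2.length_eq
    -- inversion bookkeeping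
    have hinv : invC l = invC (A ++ l[k] :: (B ++ t)) + n := by
      have e1 : invC l = invC (l.take k) + invC (l[k] :: t) + crossC (l.take k) (l[k] :: t) := by
        conv_lhs => rw [hdecomp]
        exact invC_append _ _
      have e2 : crossC (l.take k) (l[k] :: t) = n + crossC (l.take k) t := by
        rw [← hcn]
        simp [crossC]
      have e0 : invC (l.take k) = 0 := invC_sorted hss
      have e3 : invC (A ++ l[k] :: (B ++ t)) = invC ((A ++ l[k] :: B) ++ t) := by
        rw [show (A ++ l[k] :: B) ++ t = A ++ l[k] :: (B ++ t) by simp]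
      have e4 : invC ((A ++ l[k] :: B) ++ t)
          = invC (A ++ l[k] :: B) + invC t + crossC (A ++ l[k] :: B) t := invC_append _ _
      have e5 : invC (A ++ l[k] :: B) = 0 := invC_sorted hins
      have e6 : crossC (A ++ l[k] :: B) t = crossC (l[k] :: l.take k) t := by
        apply crossC_perm_left
        calc (A ++ l[k] :: B).Perm (l[k] :: (A ++ B)) := List.perm_middle
          _ = l[k] :: l.take k := by rw [htad]
      have e7 : crossC (l[k] :: l.take k) t
          = t.countP (fun y => decide (y < l[k])) + crossC (l.take k) t := crossC_cons_left _ _ _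
      have e8 : invC (l[k] :: t) = t.countP (fun y => decide (y < l[k])) + invC t := rfl
      omega
    -- the recursive call
    have hsorted2 : List.Pairwise (· ≤ ·) ((A ++ l[k] :: (B ++ t)).take (k + 1)) := by
      have : (A ++ l[k] :: (B ++ t)).take (k + 1) = A ++ l[k] :: B := by
        have hl : (A ++ l[k] :: B).length = k + 1 := by simp; omega
        rw [show A ++ l[k] :: (B ++ t) = (A ++ l[k] :: B) ++ t by simp]
        exact List.take_left' hl
      rw [this]
      exact hins
    obtain ⟨r, hr, hrp, hrs⟩ := ihm (A ++ l[k] :: (B ++ t)) (k + 1)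
      (p ^^ decide (n % 2 = 1)) (by omega) (by omega) hsorted2
    refine ⟨r, ?_, hrp.trans hperm2, hrs⟩
    have i1' := i1
    rw [i2] at i1'
    rw [hget]
    show pvOuterA ((pvInnerA l l[k] k p).1.set (pvInnerA l l[k] k p).2.1 l[k]) (k + 1)
        (pvInnerA l l[k] k p).2.2 = (r, p ^^ decide (invC l % 2 = 1))
    rw [hre, i2, i3, i1', hr, hinv, parity_add]
    congr 1
    cases p <;> cases decide (invC (A ++ l[k] :: (B ++ t)) % 2 = 1) <;>
      cases decide (n % 2 = 1) <;> rfl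

-- ===== VERDICT (by name: the statement is the Claim_ definition above) =====
theorem sortWithParity_spec : Claim_equal_sortWithParity := by
  intro gms _
  obtain ⟨r, hr, hperm, hsort⟩ := pvOuterA_spec gms.length gms 0 true (by omega) (by omega) (by simp)
  obtain ⟨hperm', hsort', hinv⟩ := pvMsortB_spec gms
  have he : r = (pvMsortB gms).1 := List.Perm.eq_of_pairwise (fun a b _ _ h1 h2 => le_antisymm h1 h2) hsort hsort' (hperm.trans hperm'.symm)
  have hpar : (true ^^ decide (invC gms % 2 = 1)) = decide (invC gms % 2 = 0) := by
    rcases Nat.even_or_odd (invC gms) with h | h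
    · simp [Nat.even_iff.mp h]
    · simp [Nat.odd_iff.mp h]
  show sortWithParity gms = sortWithParity_alt gms
  show pvOuterA gms 0 true = ((pvMsortB gms).1, decide ((pvMsortB gms).2 % 2 = 0))
  rw [hr, he, hinv, hpar]
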